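-- pv_equiv track=rewrite | github.com/nicolas-001/FoodieNet | recipes/helpers.py | limpiar_ingredientes
-- ===== SOURCE A (Python) =====
-- def limpiar_ingredientes(lista_ingredientes):
--     ingredientes = []
--     # lista_ingredientes debe ser una lista de strings (cada string puede ser multilínea)
--     for item in lista_ingredientes:
--         # Aseguramos que item sea string
--         if not isinstance(item, str):
--             continue
--
--         lineas = item.splitlines()  # separa por líneas
--         for linea in lineas:
--             linea = linea.strip()
--             if linea:
--                 ingredientes.append(linea)
--     return ingredientes
-- ===== SOURCE B (Python) =====
-- def limpiar_ingredientes(lista_ingredientes):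
--     # Single character-level scanner (ASCII text): instead of splitlines/strip,
--     # walk each string once, emitting a line at '\n' / '\r' / '\r\n'; leading
--     # whitespace is never recorded and interior whitespace is held in a pending
--     # run that is flushed only when a non-space character follows, so trailing
--     # whitespace is dropped for free. Empty (all-whitespace) lines never emit.
--     res = []
--     for item in lista_ingredientes:
--         if not isinstance(item, str):
--             continue
--         cur = []    # current line so far, leading/trailing whitespace excluded
--         pend = []   # pending run of interior whitespace
--         i, n = 0, len(item)
--         while i < n:
--             c = item[i]
--             if c == '\n' or c == '\r':
--                 if cur:
--                     res.append(''.join(cur))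
--                 cur, pend = [], []
--                 if c == '\r' and i + 1 < n and item[i + 1] == '\n':
--                     i += 1
--             elif c == ' ' or c == '\t':
--                 if cur:
--                     pend.append(c)
--             else:
--                 cur.extend(pend)
--                 pend = []
--                 cur.append(c)
--             i += 1
--         if cur:
--             res.append(''.join(cur))
--     return res
-- ===== Notes on version B (the rewrite author's own statement) =====
-- stated objective: alternative
-- what changed: B replaces A's splitlines+strip library pipeline by an explicit one-pass character-level state machine: it scans each string once, emits a line at \n/\r/\r\n boundaries, drops leading whitespace by never recording it and trailing whitespace via a pending-run buffer, so no intermediate line list or stripped copies are built.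
import Mathlib
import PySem

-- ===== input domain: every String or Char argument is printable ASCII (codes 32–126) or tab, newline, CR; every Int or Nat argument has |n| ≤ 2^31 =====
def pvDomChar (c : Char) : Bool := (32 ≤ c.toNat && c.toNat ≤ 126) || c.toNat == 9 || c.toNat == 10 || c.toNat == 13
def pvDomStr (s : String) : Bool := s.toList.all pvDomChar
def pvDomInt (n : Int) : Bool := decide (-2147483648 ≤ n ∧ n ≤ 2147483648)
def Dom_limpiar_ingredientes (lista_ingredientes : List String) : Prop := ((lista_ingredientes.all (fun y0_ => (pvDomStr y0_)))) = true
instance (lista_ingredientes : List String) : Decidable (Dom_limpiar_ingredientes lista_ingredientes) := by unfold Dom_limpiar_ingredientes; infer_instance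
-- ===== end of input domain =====

-- B replaces A's splitlines+strip pipeline by a one-pass character-level state
-- machine (line buffer + pending-whitespace run); objective: alternative.

-- ===== PORT A =====
-- Port note: under the List String typing every item is a string, so the
-- `isinstance(item, str)` guard is always true and its `continue` is vacuous.
def limpiar_ingredientes (lista_ingredientes : List String) : List String :=
  lista_ingredientes.foldl
    (fun ingredientes item =>
      (PySem.Str.splitlines item).foldl
        (fun ingredientes linea =>
          let linea := PySem.Str.strip linea
          if linea ≠ "" then ingredientes ++ [linea] else ingredientes)
        ingredientes)
    []

-- ===== PORT B =====
-- Source B's while-loop over one item's characters: `cur` is the current line with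
-- leading/trailing whitespace excluded, `pend` the pending whitespace run; the
-- `item[i+1]` lookahead for "\r\n" becomes matching on the head of the rest.
def pvScan (item : List Char) (cur pend : List Char) (res : List String) : List String :=
  match item with
  | [] => if cur ≠ [] then res ++ [String.ofList cur] else res
  | c :: rest =>
    if c = '\n' ∨ c = '\r' then
      let res' := if cur ≠ [] then res ++ [String.ofList cur] else res
      let rest' := if c = '\r' ∧ rest.head? = some '\n' then rest.tail else rest
      pvScan rest' [] [] res'
    else if c = ' ' ∨ c = '\t' then
      pvScan rest cur (if cur ≠ [] then pend ++ [c] else pend) res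
    else
      pvScan rest (cur ++ pend ++ [c]) [] res
termination_by item.length
decreasing_by
  · split <;> simp [List.length_tail]
  · simp
  · simp

-- (the `isinstance` filter of Source B keeps every element of a List String)
def limpiar_ingredientes_alt (lista_ingredientes : List String) : List String :=
  lista_ingredientes.foldl (fun res item => pvScan item.toList [] [] res) []

-- ===== PRECONDITION & SPEC =====
def Spec_limpiar_ingredientes (lista_ingredientes : List String) (out : List String) : Prop := out = limpiar_ingredientes_alt lista_ingredientes
instance (lista_ingredientes : List String) (out : List String) : Decidable (Spec_limpiar_ingredientes lista_ingredientes out) := by unfold Spec_limpiar_ingredientes; infer_instance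

-- ===== CLAIM (what is proved, stated in full; the proofs are below) =====
def Claim_equal_limpiar_ingredientes : Prop := ∀ (lista_ingredientes : List String), Dom_limpiar_ingredientes lista_ingredientes → Spec_limpiar_ingredientes lista_ingredientes (limpiar_ingredientes lista_ingredientes)

-- ===== LEMMAS AND PROOFS =====

-- The line-break test used by PySem.Chars.splitlines, named so we can reason about its loop.
def pvIsB (c : Char) : Bool :=
  decide (c.toNat = 10) || decide (c.toNat = 13) || decide (c.toNat = 11) ||
    decide (c.toNat = 12) || decide (c.toNat = 28) || decide (c.toNat = 29) ||
    decide (c.toNat = 30) || decide (c.toNat = 133) || decide (c.toNat = 8232) ||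
    decide (c.toNat = 8233)

theorem pv_splitlines_eq (s : List Char) :
    PySem.Chars.splitlines s = PySem.Chars.splitlines.go pvIsB s [] [] := rfl

-- strip-and-drop-empties, the common post-processing, on char lists
def pvQc (ls : List (List Char)) : List (List Char) :=
  (ls.map PySem.Chars.strip).filter (fun cs => cs ≠ [])

theorem pv_go_nil (isB : Char → Bool) (cur : List Char) (acc : List (List Char)) :
    PySem.Chars.splitlines.go isB [] cur acc =
      (if cur.isEmpty then acc.reverse else (cur.reverse :: acc).reverse) := rfl

theorem pv_go_crlf (isB : Char → Bool) (rest : List Char) (cur : List Char) (acc : List (List Char)) :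
    PySem.Chars.splitlines.go isB ('\r' :: '\n' :: rest) cur acc =
      PySem.Chars.splitlines.go isB rest [] (cur.reverse :: acc) := rfl

theorem pv_go_cons (isB : Char → Bool) (c : Char) (rest : List Char) (cur : List Char)
    (acc : List (List Char)) (h : ¬(c = '\r' ∧ rest.head? = some '\n')) :
    PySem.Chars.splitlines.go isB (c :: rest) cur acc =
      (if isB c then PySem.Chars.splitlines.go isB rest [] (cur.reverse :: acc)
       else PySem.Chars.splitlines.go isB rest (c :: cur) acc) := by
  cases rest with
  | nil => simp only [PySem.Chars.splitlines.go]
  | cons a t =>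
      by_cases hc : c = '\r'
      · have ha : a ≠ '\n' := fun hh => h ⟨hc, by simp [hh]⟩
        subst hc
        rw [PySem.Chars.splitlines.go]
        all_goals (intro r _ h1; injection h1 with h1a _; exact ha h1a)
      · rw [PySem.Chars.splitlines.go]
        all_goals (intro r hr _; exact hc hr)

-- the accumulator of splitlines.go is a reversed prefix of the output
theorem pv_go_acc : ∀ (n : Nat) (x : List Char), x.length ≤ n →
    ∀ (cur : List Char) (acc : List (List Char)),
    PySem.Chars.splitlines.go pvIsB x cur acc =
      acc.reverse ++ PySem.Chars.splitlines.go pvIsB x cur [] := by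
  intro n
  induction n with
  | zero =>
      intro x hx cur acc
      have hxe : x = [] := List.eq_nil_of_length_eq_zero (Nat.le_zero.mp hx)
      subst hxe
      rw [pv_go_nil, pv_go_nil]
      split <;> simp
  | succ n ih =>
      intro x hx cur acc
      cases x with
      | nil => rw [pv_go_nil, pv_go_nil]; split <;> simp
      | cons c rest =>
          by_cases hcr : c = '\r' ∧ rest.head? = some '\n'
          · obtain ⟨hc, hh⟩ := hcr
            subst hc
            cases rest with
            | nil => simp at hh
            | cons a t =>
                have ha : a = '\n' := by simpa using hh
                subst ha
                have ht : t.length ≤ n := by simp at hx; omega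
                rw [pv_go_crlf, pv_go_crlf,
                    ih t ht [] (cur.reverse :: acc), ih t ht [] [cur.reverse]]
                simp
          · have hr : rest.length ≤ n := by simp at hx; omega
            rw [pv_go_cons _ _ _ _ _ hcr, pv_go_cons _ _ _ _ _ hcr]
            by_cases hb : pvIsB c = true
            · rw [if_pos hb, if_pos hb,
                  ih rest hr [] (cur.reverse :: acc), ih rest hr [] [cur.reverse]]
              simp
            · rw [if_neg hb, if_neg hb, ih rest hr (c :: cur) acc]

-- code-point classification on the ASCII domain
theorem pv_char_code (a b : Char) (h : a.toNat = b.toNat) : a = b := by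
  cases a; cases b
  simp only [Char.toNat] at h
  congr 1
  exact UInt32.toNat_inj.mp h

theorem pv_isB_dom (c : Char) (hd : pvDomChar c = true) :
    pvIsB c = (decide (c = '\n') || decide (c = '\r')) := by
  by_cases h10 : c.toNat = 10
  · have : c = '\n' := pv_char_code c '\n' (by rw [h10]; rfl)
    subst this; rfl
  · by_cases h13 : c.toNat = 13
    · have : c = '\r' := pv_char_code c '\r' (by rw [h13]; rfl)
      subst this; rfl
    · have hne1 : c ≠ '\n' := fun h => h10 (by rw [h]; rfl)
      have hne2 : c ≠ '\r' := fun h => h13 (by rw [h]; rfl)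
      simp only [pvDomChar, Bool.or_eq_true, Bool.and_eq_true, decide_eq_true_eq,
        beq_iff_eq] at hd
      have hfalse : pvIsB c = false := by
        simp only [pvIsB, Bool.or_eq_false_iff, decide_eq_false_iff_not]
        omega
      simp [hfalse, hne1, hne2]

theorem pv_isspace_dom (c : Char) (hd : pvDomChar c = true)
    (h1 : c ≠ '\n') (h2 : c ≠ '\r') :
    PySem.Chars.isspace c = (decide (c = ' ') || decide (c = '\t')) := by
  by_cases h32 : c.toNat = 32
  · have : c = ' ' := pv_char_code c ' ' (by rw [h32]; rfl)
    subst this; rfl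
  · by_cases h9 : c.toNat = 9
    · have : c = '\t' := pv_char_code c '\t' (by rw [h9]; rfl)
      subst this; rfl
    · have hne1 : c ≠ ' ' := fun h => h32 (by rw [h]; rfl)
      have hne2 : c ≠ '\t' := fun h => h9 (by rw [h]; rfl)
      have h10 : c.toNat ≠ 10 := fun h => h1 (pv_char_code c '\n' (by rw [h]; rfl))
      have h13 : c.toNat ≠ 13 := fun h => h2 (pv_char_code c '\r' (by rw [h]; rfl))
      simp only [pvDomChar, Bool.or_eq_true, Bool.and_eq_true, decide_eq_true_eq,
        beq_iff_eq] at hd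
      have hfalse : PySem.Chars.isspace c = false := by
        simp only [PySem.Chars.isspace, Bool.or_eq_false_iff, Bool.and_eq_false_iff,
          decide_eq_false_iff_not]
        omega
      simp [hfalse, hne1, hne2]

theorem pvQc_append (l₁ l₂ : List (List Char)) : pvQc (l₁ ++ l₂) = pvQc l₁ ++ pvQc l₂ := by
  simp [pvQc]

-- the shape invariant of pvScan's state
def pvState (cur pend : List Char) : Prop :=
  (cur = [] → pend = []) ∧ (∀ c ∈ pend, PySem.Chars.isspace c = true) ∧
    (∀ d, cur.getLast? = some d → PySem.Chars.isspace d = false)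

theorem pv_strip_state (cur pend : List Char) (h : pvState cur pend) :
    PySem.Chars.rstrip (cur ++ pend) = cur := by
  obtain ⟨h1, h2, h3⟩ := h
  unfold PySem.Chars.rstrip
  rw [List.reverse_append, List.dropWhile_append]
  have hp : List.dropWhile PySem.Chars.isspace pend.reverse = [] := by
    rw [List.dropWhile_eq_nil_iff]
    intro c hc; exact h2 c (List.mem_reverse.mp hc)
  rw [hp]
  simp only [List.isEmpty_nil, if_pos]
  cases hcur : cur.reverse with
  | nil => simp_all
  | cons d t =>
      have hd : cur.getLast? = some d := by
        rw [← List.head?_reverse, hcur]; rfl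
      rw [List.dropWhile_cons, h3 d hd]
      simp [← hcur]

-- MAIN INVARIANT: pvScan agrees with strip-filtered splitlines.go, where the raw
-- line consumed so far is w and its left-stripped form is cur ++ pend.
theorem pv_main : ∀ (n : Nat) (x : List Char), x.length ≤ n →
    (∀ c ∈ x, pvDomChar c = true) →
    ∀ (w cur pend : List Char) (res : List String),
    PySem.Chars.lstrip w = cur ++ pend → pvState cur pend →
    pvScan x cur pend res =
      res ++ (pvQc (PySem.Chars.splitlines.go pvIsB x w.reverse [])).map String.ofList := by
  intro n
  induction n with
  | zero =>
      intro x hx _ w cur pend res hw hs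
      have hxe : x = [] := List.eq_nil_of_length_eq_zero (Nat.le_zero.mp hx)
      subst hxe
      rw [pv_go_nil]
      have hstrip : PySem.Chars.strip w = cur := by
        unfold PySem.Chars.strip; rw [hw]; exact pv_strip_state cur pend hs
      by_cases hwnil : w = []
      · subst hwnil
        have hcur : cur = [] := by
          have := hw.symm
          simp [PySem.Chars.lstrip] at this
          exact this.1
        simp [pvScan, hcur, pvQc]
      · have : w.reverse.isEmpty = false := by simpa using hwnil
        rw [this]
        simp only [Bool.false_eq_true, if_false, List.reverse_cons, List.reverse_nil,
          List.nil_append, List.reverse_reverse]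
        by_cases hcur : cur = []
        · simp [pvScan, hcur, pvQc, hstrip]
        · simp [pvScan, hcur, pvQc, hstrip]
  | succ n ih =>
      intro x hx hdom w cur pend res hw hs
      have hstrip : PySem.Chars.strip w = cur := by
        unfold PySem.Chars.strip; rw [hw]; exact pv_strip_state cur pend hs
      cases x with
      | nil => exact ih [] (Nat.zero_le n) (by simp) w cur pend res hw hs
      | cons c rest =>
          have hdc : pvDomChar c = true := hdom c (List.mem_cons_self ..)
          have hdrest : ∀ a ∈ rest, pvDomChar a = true := fun a ha => hdom a (List.mem_cons_of_mem _ ha)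
          have hemit : pvQc [w] = if cur ≠ [] then [cur] else [] := by
            by_cases hcur : cur = [] <;> simp [pvQc, hstrip, hcur]
          by_cases hbr : c = '\n' ∨ c = '\r'
          · -- break character
            rw [pvScan]
            simp only [if_pos hbr]
            by_cases hcrlf : c = '\r' ∧ rest.head? = some '\n'
            · obtain ⟨hc, hh⟩ := hcrlf
              subst hc
              cases rest with
              | nil => simp at hh
              | cons a t =>
                  have ha : a = '\n' := by simpa using hh
                  subst ha
                  have ht : t.length ≤ n := by simp at hx; omega
                  rw [pv_go_crlf, pv_go_acc t.length t le_rfl [] [w.reverse.reverse],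
                      if_pos ⟨rfl, rfl⟩]
                  have := ih t ht (fun a ha => hdrest a (List.mem_cons_of_mem _ ha))
                    [] [] [] (if cur ≠ [] then res ++ [String.ofList cur] else res)
                    (by simp [PySem.Chars.lstrip]) ⟨fun _ => rfl, by simp, by simp⟩
                  rw [List.tail_cons, this]
                  simp only [List.reverse_cons, List.reverse_nil, List.nil_append,
                    List.reverse_reverse, List.singleton_append]
                  rw [show (w :: PySem.Chars.splitlines.go pvIsB t [] []) =
                        [w] ++ PySem.Chars.splitlines.go pvIsB t [] [] from rfl,
                      pvQc_append, hemit]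
                  by_cases hcur : cur = [] <;> simp [hcur]
            · have hnb : pvIsB c = true := by
                rw [pv_isB_dom c hdc]
                rcases hbr with h | h <;> simp [h]
              have hr : rest.length ≤ n := by simp at hx; omega
              rw [pv_go_cons _ _ _ _ _ hcrlf, if_pos hnb,
                  pv_go_acc rest.length rest le_rfl [] [w.reverse.reverse],
                  if_neg hcrlf]
              have := ih rest hr hdrest [] [] []
                (if cur ≠ [] then res ++ [String.ofList cur] else res)
                (by simp [PySem.Chars.lstrip]) ⟨fun _ => rfl, by simp, by simp⟩
              rw [this]
              simp only [List.reverse_cons, List.reverse_nil, List.nil_append,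
                List.reverse_reverse, List.singleton_append]
              rw [show (w :: PySem.Chars.splitlines.go pvIsB rest [] []) =
                    [w] ++ PySem.Chars.splitlines.go pvIsB rest [] [] from rfl,
                  pvQc_append, hemit]
              by_cases hcur : cur = [] <;> simp [hcur]
          · -- not a break character
            have hne1 : c ≠ '\n' := fun h => hbr (Or.inl h)
            have hne2 : c ≠ '\r' := fun h => hbr (Or.inr h)
            have hnb : pvIsB c = false := by
              rw [pv_isB_dom c hdc]; simp [hne1, hne2]
            have hncrlf : ¬(c = '\r' ∧ rest.head? = some '\n') := fun h => hne2 h.1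
            have hr : rest.length ≤ n := by simp at hx; omega
            rw [pv_go_cons _ _ _ _ _ hncrlf, if_neg (by simp [hnb])]
            have hwrev : (c :: w.reverse) = (w ++ [c]).reverse := by simp
            rw [pvScan]
            simp only [if_neg hbr]
            by_cases hws : c = ' ' ∨ c = '\t'
            · -- whitespace: goes to the pending run (or is dropped as leading)
              rw [if_pos hws]
              have hsp : PySem.Chars.isspace c = true := by
                rw [pv_isspace_dom c hdc hne1 hne2]
                rcases hws with h | h <;> simp [h]
              by_cases hcur : cur = []
              · -- leading whitespace: lstrip w = [] (pend = [] too), stays []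
                have hpend : pend = [] := hs.1 hcur
                have hlw : PySem.Chars.lstrip w = [] := by rw [hw, hcur, hpend]; rfl
                have hlw' : PySem.Chars.lstrip (w ++ [c]) = [] := by
                  unfold PySem.Chars.lstrip at hlw ⊢
                  rw [List.dropWhile_append, hlw]
                  simp [List.dropWhile_cons, hsp]
                have := ih rest hr hdrest (w ++ [c]) cur (if cur ≠ [] then pend ++ [c] else pend) res
                  (by simp [hcur, hpend, hlw']) (by simp [pvState, hcur, hpend])
                rw [this, hwrev]
              · -- interior whitespace: appended to pend
                have hlwne : cur ++ pend ≠ [] := by simp [hcur]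
                have hlw' : PySem.Chars.lstrip (w ++ [c]) = cur ++ (pend ++ [c]) := by
                  unfold PySem.Chars.lstrip at hw ⊢
                  rw [List.dropWhile_append, hw]
                  rw [if_neg (by simpa using hlwne)]
                  simp
                have := ih rest hr hdrest (w ++ [c]) cur (if cur ≠ [] then pend ++ [c] else pend) res
                  (by simpa [hcur] using hlw')
                  (by
                    refine ⟨fun h => absurd h hcur, ?_, hs.2.2⟩
                    simp only [if_pos hcur]
                    intro a ha
                    rcases List.mem_append.mp ha with h | h
                    · exact hs.2.1 a h
                    · simp at h; subst h; exact hsp)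
                rw [this, hwrev]
            · -- ordinary character: flush pend into cur
              rw [if_neg hws]
              have hsp : PySem.Chars.isspace c = false := by
                rw [pv_isspace_dom c hdc hne1 hne2]
                simp only [Bool.or_eq_false_iff, decide_eq_false_iff_not]
                exact ⟨fun h => hws (Or.inl h), fun h => hws (Or.inr h)⟩
              have hlw' : PySem.Chars.lstrip (w ++ [c]) = (cur ++ pend ++ [c]) ++ [] := by
                unfold PySem.Chars.lstrip at hw ⊢
                rw [List.dropWhile_append, hw]
                by_cases hcp : cur ++ pend = []
                · rw [hcp, List.isEmpty_nil, if_pos rfl]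
                  simp [List.dropWhile_cons, hsp, hcp]
                · rw [if_neg (by simpa using hcp)]
                  simp
              have := ih rest hr hdrest (w ++ [c]) (cur ++ pend ++ [c]) [] res hlw'
                (by
                  refine ⟨by simp, by simp, ?_⟩
                  intro d hd
                  simp at hd; subst hd; exact hsp)
              rw [this, hwrev]

theorem pvQc_eq_strfilter (s : String) :
    ((PySem.Str.splitlines s).map PySem.Str.strip).filter (fun t => t ≠ "") =
      (pvQc (PySem.Chars.splitlines s.toList)).map String.ofList := by
  show (((PySem.Chars.splitlines s.toList).map String.ofList).map PySem.Str.strip).filter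
      (fun t => t ≠ "") = _
  rw [List.map_map]
  have hmap : (PySem.Str.strip ∘ String.ofList) =
      (fun cs => String.ofList (PySem.Chars.strip cs)) := by
    funext cs; simp [PySem.Str.strip, Function.comp]
  rw [hmap, pvQc, List.filter_map]
  have hpred : ((fun t => decide (t ≠ "")) ∘ (fun cs => String.ofList (PySem.Chars.strip cs))) =
      ((fun cs => decide (cs ≠ ([] : List Char))) ∘ PySem.Chars.strip) := by
    funext cs; simp [Function.comp]
  rw [hpred, List.filter_map, List.map_map]
  rfl

-- A's inner loop appends the strip-filtered lines
theorem pv_inner (lines : List String) : ∀ (acc : List String),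
    lines.foldl (fun ing linea =>
        let linea := PySem.Str.strip linea
        if linea ≠ "" then ing ++ [linea] else ing) acc =
      acc ++ (lines.map PySem.Str.strip).filter (fun t => t ≠ "") := by
  induction lines with
  | nil => intro acc; simp
  | cons l rest ih =>
      intro acc
      by_cases h : PySem.Str.strip l ≠ ""
      · simp only [List.foldl_cons, if_pos h, ih]
        simp [h]
      · simp only [List.foldl_cons, if_neg h, ih]
        simp at h
        simp [h]

-- both outer loops concatenate the per-item contributions
theorem pv_outer (f : String → List String) (l : List String)
    (g : List String → String → List String)
    (hg : ∀ acc item, item ∈ l → g acc item = acc ++ f item) : ∀ (acc : List String),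
    l.foldl g acc = acc ++ (l.map f).flatten := by
  induction l with
  | nil => intro acc; simp
  | cons x rest ih =>
      intro acc
      simp only [List.foldl_cons, hg acc x (List.mem_cons_self ..),
        ih (fun a i hi => hg a i (List.mem_cons_of_mem _ hi))]
      simp

-- ===== VERDICT (by name: the statement is the Claim_ definition above) =====
theorem limpiar_ingredientes_spec : Claim_equal_limpiar_ingredientes := by
  intro l hdom
  show limpiar_ingredientes l = limpiar_ingredientes_alt l
  have hdom' : ∀ item ∈ l, ∀ c ∈ item.toList, pvDomChar c = true := by
    intro item hi c hc
    have := (List.all_eq_true.mp hdom) item hi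
    exact List.all_eq_true.mp (by simpa [pvDomStr] using this) c hc
  unfold limpiar_ingredientes limpiar_ingredientes_alt
  simp only [pv_inner]
  rw [pv_outer (fun item => ((PySem.Str.splitlines item).map PySem.Str.strip).filter
        (fun t => t ≠ "")) l _ (fun acc item _ => rfl),
      pv_outer (fun item => (pvQc (PySem.Chars.splitlines item.toList)).map String.ofList) l _
        (fun acc item hi => by
          show pvScan item.toList [] [] acc =
            acc ++ (pvQc (PySem.Chars.splitlines item.toList)).map String.ofList
          rw [pv_splitlines_eq]
          exact pv_main item.toList.length item.toList le_rfl (hdom' item hi)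
            [] [] [] acc (by simp [PySem.Chars.lstrip]) ⟨fun _ => rfl, by simp, by simp⟩)]
  simp only [pvQc_eq_strfilter]
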